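-- pv_equiv track=rewrite | github.com/himanshunita009/Python-DSA | Uber/FlipToConvertAllZero.py | maximumK
-- ===== SOURCE A (Python) =====
-- def maximumK(S):
--     N = len(S)
--
--     # Stores the maximum value of K
--     ans = N
--
--     flag = 0
--
--     # Traverse the given string S
--     for i in range(N - 1):
--
--         # Store the minimum of the
--         # maximum of LHS and RHS length
--         if (S[i] != S[i + 1]):
--
--             # Flip performed
--             flag = 1
--             ans = min(ans, max(i + 1,N - i - 1))
--
--     # If no flips performed
--     if (flag == 0):
--         return 0
--
--     # Return the possible value of K
--     return ans
-- ===== SOURCE B (Python) =====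
-- def maximumK(S):
--     N = len(S)
--     # f(i) = max(i+1, N-i-1) is V-shaped; scan candidate values v upward from
--     # its minimum ceil(N/2): the indices with f(i) == v are exactly v-1 and N-1-v.
--     for v in range((N + 1) // 2, N + 1):
--         for i in (v - 1, N - 1 - v):
--             if 0 <= i < N - 1 and S[i] != S[i + 1]:
--                 return v
--     return 0
-- ===== Notes on version B (the rewrite author's own statement) =====
-- stated objective: faster
-- what changed: A keeps a running minimum of max(i+1,N-i-1) over all mismatch boundaries in a full left-to-right scan; B exploits that this objective is V-shaped in i and scans candidate answer values upward from its minimum ceil(N/2), returning the first value whose two candidate boundaries (v-1 and N-1-v) contain a mismatch, so it exits at the mismatch nearest the center instead of scanning the whole string.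
import Mathlib
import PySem

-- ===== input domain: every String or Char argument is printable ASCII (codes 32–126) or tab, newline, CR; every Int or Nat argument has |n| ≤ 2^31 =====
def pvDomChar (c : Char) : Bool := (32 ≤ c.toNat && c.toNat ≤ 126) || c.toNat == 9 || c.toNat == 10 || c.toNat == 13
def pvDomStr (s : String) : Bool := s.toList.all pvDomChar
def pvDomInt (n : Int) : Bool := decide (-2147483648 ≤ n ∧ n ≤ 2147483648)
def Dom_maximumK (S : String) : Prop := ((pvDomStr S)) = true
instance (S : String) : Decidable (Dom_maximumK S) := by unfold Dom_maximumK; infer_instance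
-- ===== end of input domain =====

-- B is an alternative decomposition: instead of A's left-to-right running minimum over all
-- mismatch boundaries, B scans candidate answer values upward from the V-shape's minimum
-- and returns the first value realized by a mismatch boundary (same result; early exit, measured faster).

-- ===== PORT A =====
-- literal transliteration of A: fold over range(N-1) carrying (ans, flag).
-- indices i and i+1 are always in range here, so pyGetD with a dummy default is exact.
def maximumK (S : String) : Int :=
  let cs := S.toList
  let N : Int := (cs.length : Int)
  let st := (PySem.List.pyRange 0 (N - 1) 1).foldl
    (fun (p : Int × Int) i =>
      if (PySem.List.pyGetD cs i ' ' != PySem.List.pyGetD cs (i + 1) ' ') then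
        (min p.1 (max (i + 1) (N - i - 1)), 1)
      else p) (N, 0)
  if st.2 = 0 then 0 else st.1

-- ===== PORT B =====
-- helper of B: the bounds-checked mismatch test '0 <= i < N - 1 and S[i] != S[i+1]'
def pvMismatch (cs : List Char) (N i : Int) : Bool :=
  decide (0 ≤ i) && decide (i < N - 1) &&
    (PySem.List.pyGetD cs i ' ' != PySem.List.pyGetD cs (i + 1) ' ')

-- literal transliteration of B: first v in range((N+1)//2, N+1) whose two candidate
-- boundaries v-1 and N-1-v contain a mismatch; the early 'return' is List.find?.
def maximumK_alt (S : String) : Int :=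
  let cs := S.toList
  let N : Int := (cs.length : Int)
  match (PySem.List.pyRange (PySem.Int.floordiv (N + 1) 2) (N + 1) 1).find?
      (fun v => pvMismatch cs N (v - 1) || pvMismatch cs N (N - 1 - v)) with
  | some v => v
  | none => 0

-- ===== PRECONDITION & SPEC =====
def Spec_maximumK (S : String) (out : Int) : Prop := out = maximumK_alt S
instance (S : String) (out : Int) : Decidable (Spec_maximumK S out) := by unfold Spec_maximumK; infer_instance

-- ===== CLAIM (what is proved, stated in full; the proofs are below) =====
def Claim_equal_maximumK : Prop := ∀ (S : String), Dom_maximumK S → Spec_maximumK S (maximumK S)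

-- ===== LEMMAS AND PROOFS =====

-- A's loop body, characterized: the fold equals (min-fold over the mismatching indices, flag).
theorem pv_fold_char (cs : List Char) (N : Int) (L : List Int) (x fl : Int) :
    L.foldl
      (fun (p : Int × Int) i =>
        if (PySem.List.pyGetD cs i ' ' != PySem.List.pyGetD cs (i + 1) ' ') then
          (min p.1 (max (i + 1) (N - i - 1)), 1)
        else p) (x, fl)
    = ((L.filter (fun i => PySem.List.pyGetD cs i ' ' != PySem.List.pyGetD cs (i + 1) ' ')).foldl
         (fun a i => min a (max (i + 1) (N - i - 1))) x,
       if L.any (fun i => PySem.List.pyGetD cs i ' ' != PySem.List.pyGetD cs (i + 1) ' ') then 1 else fl) := by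
  induction L generalizing x fl with
  | nil => simp
  | cons i L ih =>
    simp only [List.foldl_cons, List.filter_cons, List.any_cons]
    by_cases h : (PySem.List.pyGetD cs i ' ' != PySem.List.pyGetD cs (i + 1) ' ') = true
    · rw [if_pos h, ih]
      simp [h]
    · rw [if_neg h, ih]
      rw [Bool.not_eq_true] at h
      simp [h]

theorem pv_foldl_min_le (f : Int → Int) (L : List Int) (x : Int) :
    L.foldl (fun a i => min a (f i)) x ≤ x ∧ ∀ i ∈ L, L.foldl (fun a i => min a (f i)) x ≤ f i := by
  induction L generalizing x with
  | nil => simp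
  | cons j L ih =>
    constructor
    · simp only [List.foldl_cons]
      exact le_trans (ih (min x (f j))).1 (min_le_left _ _)
    · intro i hi
      simp only [List.foldl_cons]
      rcases List.mem_cons.1 hi with h | h
      · rw [h]
        exact le_trans (ih (min x (f j))).1 (min_le_right _ _)
      · exact (ih (min x (f j))).2 i h

theorem pv_foldl_min_attained (f : Int → Int) (L : List Int) (x : Int) :
    L.foldl (fun a i => min a (f i)) x = x ∨ ∃ i ∈ L, L.foldl (fun a i => min a (f i)) x = f i := by
  induction L generalizing x with
  | nil => simp
  | cons j L ih =>
    simp only [List.foldl_cons]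
    rcases ih (min x (f j)) with h | ⟨i, hi, h⟩
    · rcases min_choice x (f j) with hm | hm
      · exact Or.inl (by simpa [hm] using h)
      · exact Or.inr ⟨j, List.mem_cons_self, by simpa [hm] using h⟩
    · exact Or.inr ⟨i, List.mem_cons_of_mem _ hi, h⟩

-- find? on an ascending integer range returns the least element satisfying q.
theorem pv_find?_pyRange (q : Int → Bool) (b m : Int) :
    ∀ (k : Nat) (a : Int), (b - a).toNat = k → a ≤ m → m < b → q m = true →
      (∀ u, a ≤ u → u < m → q u = false) →
      (PySem.List.pyRange a b 1).find? q = some m := by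
  intro k
  induction k with
  | zero => intro a hk ham hmb _ _; omega
  | succ k ih =>
    intro a hk ham hmb hq hmin
    rw [PySem.List.pyRange_one_cons (by omega)]
    by_cases hma : a = m
    · subst hma; simp [hq]
    · have hfa : q a = false := hmin a le_rfl (by omega)
      rw [List.find?_cons, hfa]
      exact ih (a + 1) (by omega) (by omega) hmb hq (fun u h1 h2 => hmin u (by omega) h2)

theorem pv_mismatch_iff (cs : List Char) (N i : Int) :
    pvMismatch cs N i = true ↔
      0 ≤ i ∧ i < N - 1 ∧ (PySem.List.pyGetD cs i ' ' != PySem.List.pyGetD cs (i + 1) ' ') = true := by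
  simp [pvMismatch, and_assoc]

-- ===== VERDICT (by name: the statement is the Claim_ definition above) =====
theorem maximumK_spec : Claim_equal_maximumK := by
  unfold Claim_equal_maximumK Spec_maximumK
  intro S _
  unfold maximumK maximumK_alt
  dsimp only
  set cs := S.toList with hcs
  set N : Int := (cs.length : Int) with hN
  have hN0 : 0 ≤ N := by simp [hN]
  set P : Int → Bool := fun i => PySem.List.pyGetD cs i ' ' != PySem.List.pyGetD cs (i + 1) ' ' with hP
  set f : Int → Int := fun i => max (i + 1) (N - i - 1) with hf
  set R := PySem.List.pyRange 0 (N - 1) 1 with hR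
  set v0 := PySem.Int.floordiv (N + 1) 2 with hv0
  have hv0' : 2 * v0 ≥ N ∧ 2 * v0 ≤ N + 1 := by
    rw [hv0, PySem.Int.floordiv_eq_ediv_of_pos (by omega)]; omega
  rw [pv_fold_char]
  by_cases hany : R.any P = true
  · -- there is a mismatch: A returns the running minimum m
    set m := (R.filter P).foldl (fun a i => min a (f i)) N with hm
    have hFne : ∃ i ∈ R.filter P, True := by
      rcases List.any_eq_true.1 hany with ⟨i, hiR, hiP⟩
      exact ⟨i, List.mem_filter.2 ⟨hiR, hiP⟩, trivial⟩
    rcases hFne with ⟨iw, hiw, -⟩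
    have hle := pv_foldl_min_le f (R.filter P) N
    have hbnd : ∀ i ∈ R.filter P, 0 ≤ i ∧ i < N - 1 ∧ P i = true := by
      intro i hi
      have h1 := (List.mem_filter.1 hi).1
      have h2 := (List.mem_filter.1 hi).2
      have := (PySem.List.mem_pyRange_one).1 (hR ▸ h1)
      exact ⟨this.1, by omega, h2⟩
    -- m is attained at some mismatch index
    have hatt : ∃ i ∈ R.filter P, m = f i := by
      rcases pv_foldl_min_attained f (R.filter P) N with h | h
      · exfalso
        have hb := hbnd iw hiw
        have h1 := hle.2 iw hiw
        have : f iw ≤ N - 1 := by rw [hf]; simp only []; omega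
        omega
      · exact h
    rcases hatt with ⟨i0, hi0, hmi0⟩
    have hb0 := hbnd i0 hi0
    have hfi0 : f i0 = max (i0 + 1) (N - i0 - 1) := rfl
    have hm2 : 2 * m ≥ N := by rw [hmi0, hfi0]; omega
    have hmN : m ≤ N := hle.1
    -- q m = true
    have hq : (pvMismatch cs N (m - 1) || pvMismatch cs N (N - 1 - m)) = true := by
      have : i0 = m - 1 ∨ i0 = N - 1 - m := by rw [hmi0, hfi0] at *; omega
      rcases this with h | h
      · apply Bool.or_eq_true_iff.2; left
        rw [← h, pv_mismatch_iff]; exact hb0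
      · apply Bool.or_eq_true_iff.2; right
        rw [← h, pv_mismatch_iff]; exact hb0
    -- minimality of m among candidate values
    have hmin : ∀ u, v0 ≤ u → u < m →
        (pvMismatch cs N (u - 1) || pvMismatch cs N (N - 1 - u)) = false := by
      intro u hu1 hu2
      apply Bool.or_eq_false_iff.2
      constructor
      · by_contra hc
        have h := pv_mismatch_iff cs N (u - 1) |>.1 (Bool.of_not_eq_false hc)
        have hmem : u - 1 ∈ R.filter P := by
          refine List.mem_filter.2 ⟨?_, h.2.2⟩
          rw [hR, PySem.List.mem_pyRange_one]; omega
        have := hle.2 (u - 1) hmem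
        have hfu : f (u - 1) = u := by rw [hf]; simp only []; omega
        omega
      · by_contra hc
        have h := pv_mismatch_iff cs N (N - 1 - u) |>.1 (Bool.of_not_eq_false hc)
        have hmem : N - 1 - u ∈ R.filter P := by
          refine List.mem_filter.2 ⟨?_, h.2.2⟩
          rw [hR, PySem.List.mem_pyRange_one]; omega
        have := hle.2 (N - 1 - u) hmem
        have hfu : f (N - 1 - u) = u := by rw [hf]; simp only []; omega
        omega
    have hfind := pv_find?_pyRange
      (fun v => pvMismatch cs N (v - 1) || pvMismatch cs N (N - 1 - v)) (N + 1) m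
      ((N + 1 - v0).toNat) v0 rfl (by omega) (by omega) hq (fun u h1 h2 => hmin u h1 h2)
    rw [hfind, if_pos hany]
    norm_num
  · -- no mismatch anywhere: both return 0
    have hno : ∀ i ∈ R, P i = false := by
      intro i hi
      by_contra hc
      exact hany (List.any_eq_true.2 ⟨i, hi, Bool.of_not_eq_false hc⟩)
    have hfind : (PySem.List.pyRange v0 (N + 1) 1).find?
        (fun v => pvMismatch cs N (v - 1) || pvMismatch cs N (N - 1 - v)) = none := by
      rw [List.find?_eq_none]
      intro v hv
      simp only [Bool.or_eq_true, not_or]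
      constructor
      · intro hc
        have h := (pv_mismatch_iff cs N (v - 1)).1 hc
        have hmem : v - 1 ∈ R := by rw [hR, PySem.List.mem_pyRange_one]; omega
        have hPf := hno _ hmem
        simp [hP] at hPf
        simp [hPf] at h
      · intro hc
        have h := (pv_mismatch_iff cs N (N - 1 - v)).1 hc
        have hmem : N - 1 - v ∈ R := by rw [hR, PySem.List.mem_pyRange_one]; omega
        have hPf := hno _ hmem
        simp [hP] at hPf
        simp [hPf] at h
    rw [hfind, if_neg hany]
    norm_num
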